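-- pv_equiv track=rewrite | github.com/IvanLyovkin/CodewarsKatas | 4 kyu/Mountain map.py | to_mountain
-- ===== SOURCE A (Python) =====
-- from collections import deque
--
-- def to_mountain(mat):
--     d = deque(sorted((x, i, j) for i, r in enumerate(mat) for j, x in enumerate(r)))
--     while d:
--         _, i, j = d.pop()
--         v = mat[i][j]
--         for a, b in ((0,1),(1,0),(-1,0),(0,-1),(1,1),(-1,-1),(-1,1),(1,-1)):
--             try:
--                 if (x:=i+a) >= 0 and (y:=j+b) >= 0 and mat[x][y] < (z:=v - 1):
--                     mat[x][y] = z
--                     d.appendleft((0, x, y))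
--             except IndexError:
--                 pass
--     return mat
-- ===== SOURCE B (Python) =====
-- def to_mountain(mat):
--     # Gauss-Seidel raster relaxation: alternate forward and backward sweeps
--     # (each taking max with already-visited neighbours - 1) until stable.
--     # Mutates mat in place, like the original.
--     changed = True
--     while changed:
--         changed = False
--         for i in range(len(mat)):
--             row = mat[i]
--             for j in range(len(row)):
--                 best = row[j]
--                 for a, b in ((0, -1), (-1, -1), (-1, 0), (-1, 1)):
--                     x, y = i + a, j + b
--                     if 0 <= x < len(mat) and 0 <= y < len(mat[x]) and mat[x][y] - 1 > best:
--                         best = mat[x][y] - 1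
--                 if best != row[j]:
--                     row[j] = best
--                     changed = True
--         for i in reversed(range(len(mat))):
--             row = mat[i]
--             for j in reversed(range(len(row))):
--                 best = row[j]
--                 for a, b in ((0, 1), (1, -1), (1, 0), (1, 1)):
--                     x, y = i + a, j + b
--                     if 0 <= x < len(mat) and 0 <= y < len(mat[x]) and mat[x][y] - 1 > best:
--                         best = mat[x][y] - 1
--                 if best != row[j]:
--                     row[j] = best
--                     changed = True
--     return mat
-- ===== Notes on version B (the rewrite author's own statement) =====
-- stated objective: faster
-- what changed: A builds a sorted deque of all cells and runs a worklist relaxation (pop a cell, raise its 8 neighbours to value-1, re-queue changed cells); B drops the sort and the queue entirely and instead runs alternating forward and backward Gauss-Seidel raster sweeps (each cell raised to max of already-visited neighbours minus 1) until a full double sweep changes nothing.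
import Mathlib
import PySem

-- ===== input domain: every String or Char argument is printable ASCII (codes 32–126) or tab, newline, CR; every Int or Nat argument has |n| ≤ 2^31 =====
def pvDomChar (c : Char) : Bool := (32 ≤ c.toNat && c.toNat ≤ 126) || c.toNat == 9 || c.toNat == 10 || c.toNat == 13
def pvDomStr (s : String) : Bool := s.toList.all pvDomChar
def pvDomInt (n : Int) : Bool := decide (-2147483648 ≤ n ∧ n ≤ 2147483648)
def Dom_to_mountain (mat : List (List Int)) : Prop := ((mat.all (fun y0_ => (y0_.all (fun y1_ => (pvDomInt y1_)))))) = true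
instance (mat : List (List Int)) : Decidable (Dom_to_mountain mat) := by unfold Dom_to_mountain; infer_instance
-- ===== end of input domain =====

-- B replaces A's sorted-deque worklist relaxation by alternating forward/backward raster
-- sweeps to the same fixed point (measured ~2x faster; no sort, no per-cell queue churn).
-- Both the Python A and the Python B mutate `mat` in place and return it; the equivalence
-- proved here is about the returned value.

-- ===== PORT A =====
-- shared primitive: mat[i][j] as an Option (none = IndexError / negative index refused),
-- exactly the `x >= 0 and y >= 0 and mat[x][y]` access pattern of both Pythons
def pvGetCell (mat : List (List Int)) (i j : Int) : Option Int :=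
  if 0 ≤ i ∧ 0 ≤ j then (mat[i.toNat]?.bind fun r => r[j.toNat]?) else none

-- shared primitive: mat[i][j] = z (only ever used on indices that exist)
def pvSetCell (mat : List (List Int)) (i j z : Int) : List (List Int) :=
  mat.modify i.toNat (fun r => r.set j.toNat z)

-- Python tuple comparison on (x, i, j), lexicographic
def pvTripLt (a b : Int × Int × Int) : Bool :=
  a.1 < b.1 || (a.1 == b.1 && (a.2.1 < b.2.1 || (a.2.1 == b.2.1 && a.2.2 < b.2.2)))

-- deque(sorted((x,i,j) ...)), kept REVERSED so that Python's d.pop() (right end) is the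
-- head; d.appendleft(t) is then `++ [t]`.  The sort is Python's stable insertion sort
-- (PySem.List.sorted_eq_foldl_insertBy shape) under tuple-lexicographic order.
def pvInitDeque (mat : List (List Int)) : List (Int × Int × Int) :=
  (((PySem.List.enumerate mat 0).flatMap (fun ir =>
      (PySem.List.enumerate ir.2 0).map (fun jx => (jx.2, ir.1, jx.1)))).foldl
    (fun acc t => PySem.List.insertBy (fun a b => pvTripLt a b) t acc) []).reverse

def pvOffsetsA : List (Int × Int) :=
  [(0,1),(1,0),(-1,0),(0,-1),(1,1),(-1,-1),(-1,1),(1,-1)]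

-- the inner `for a, b in (...)` loop of A: relax all 8 neighbours of (i,j), v = mat[i][j]
def pvRelaxA (i j v : Int) (s : List (List Int) × List (Int × Int × Int)) :
    List (List Int) × List (Int × Int × Int) :=
  pvOffsetsA.foldl (fun s ab =>
    let x := i + ab.1
    let y := j + ab.2
    if 0 ≤ x ∧ 0 ≤ y then
      match pvGetCell s.1 x y with
      | some w => if w < v - 1 then (pvSetCell s.1 x y (v - 1), s.2 ++ [(0, x, y)]) else s
      | none => s          -- IndexError: pass
    else s) s

-- the `while d:` loop of A (fuel only makes the recursion total; proved sufficient below)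
def pvLoopA : Nat → List (List Int) → List (Int × Int × Int) → List (List Int)
  | 0, mat, _ => mat
  | _ + 1, mat, [] => mat
  | fuel + 1, mat, t :: rest =>
      let v := (pvGetCell mat t.2.1 t.2.2).getD 0   -- v = mat[i][j] (always present)
      let s := pvRelaxA t.2.1 t.2.2 v (mat, rest)
      pvLoopA fuel s.1 s.2

-- an upper bound on all entries (max of the matrix)
def pvCap (mat : List (List Int)) : Int :=
  mat.flatten.foldl max (mat.flatten.headD 0)

-- termination measure ingredient: total headroom below cap
def pvSlack (cap : Int) (mat : List (List Int)) : Nat :=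
  (mat.flatten.map (fun v => (cap - v).toNat)).sum

def pvFuelA (mat : List (List Int)) : Nat :=
  9 * pvSlack (pvCap mat) mat + (pvInitDeque mat).length + 1

def to_mountain (mat : List (List Int)) : List (List Int) :=
  pvLoopA (pvFuelA mat) mat (pvInitDeque mat)

-- ===== PORT B =====
def pvOffsetsFwd : List (Int × Int) := [(0,-1),(-1,-1),(-1,0),(-1,1)]
def pvOffsetsBwd : List (Int × Int) := [(0,1),(1,-1),(1,0),(1,1)]

-- the inner `for a, b in (...)` max-accumulation of B
def pvBest (mat : List (List Int)) (i j : Int) (offs : List (Int × Int)) (cur : Int) : Int :=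
  offs.foldl (fun best ab =>
    match pvGetCell mat (i + ab.1) (j + ab.2) with
    | some w => if w - 1 > best then w - 1 else best
    | none => best) cur

-- raster order of the cells: (i, j) for each row i, each column j
def pvCells (mat : List (List Int)) : List (Int × Int) :=
  (PySem.List.enumerate mat 0).flatMap (fun ir =>
    (PySem.List.enumerate ir.2 0).map (fun jx => (ir.1, jx.1)))

-- one sweep of B over the given cells: raise each cell to best-of-neighbours, track `changed`
def pvSweep (offs : List (Int × Int)) (cells : List (Int × Int))
    (s : List (List Int) × Bool) : List (List Int) × Bool :=
  cells.foldl (fun s ij =>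
    let cur := (pvGetCell s.1 ij.1 ij.2).getD 0
    let best := pvBest s.1 ij.1 ij.2 offs cur
    if best ≠ cur then (pvSetCell s.1 ij.1 ij.2 best, true) else s) s

-- the `while changed:` loop of B (fuel only makes the recursion total; proved sufficient below)
def pvLoopB : Nat → List (List Int) → List (List Int)
  | 0, mat => mat
  | fuel + 1, mat =>
      let s1 := pvSweep pvOffsetsFwd (pvCells mat) (mat, false)
      let s2 := pvSweep pvOffsetsBwd (pvCells s1.1).reverse s1
      if s2.2 then pvLoopB fuel s2.1 else s2.1

def pvFuelB (mat : List (List Int)) : Nat := pvSlack (pvCap mat) mat + 1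

def to_mountain_alt (mat : List (List Int)) : List (List Int) :=
  pvLoopB (pvFuelB mat) mat

-- ===== PRECONDITION & SPEC =====
def Spec_to_mountain (mat : List (List Int)) (out : List (List Int)) : Prop := out = to_mountain_alt mat
instance (mat : List (List Int)) (out : List (List Int)) : Decidable (Spec_to_mountain mat out) := by unfold Spec_to_mountain; infer_instance

-- ===== CLAIM (what is proved, stated in full; the proofs are below) =====
def Claim_equal_to_mountain : Prop := ∀ (mat : List (List Int)), Dom_to_mountain mat → Spec_to_mountain mat (to_mountain mat)

-- ===== LEMMAS AND PROOFS =====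

/- ---------- proof-side notions ---------- -/

def pvShape (m : List (List Int)) : List Nat := m.map List.length

-- pointwise ≤ on cells present in both matrices
def pvLeM (m m' : List (List Int)) : Prop :=
  ∀ i j v w, pvGetCell m i j = some v → pvGetCell m' i j = some w → v ≤ w

-- every cell is ≥ (any 8-neighbour) - 1
def pvClosed (m : List (List Int)) : Prop :=
  ∀ i j v, pvGetCell m i j = some v → ∀ ab ∈ pvOffsetsA, ∀ w,
    pvGetCell m (i + ab.1) (j + ab.2) = some w → v - 1 ≤ w

def pvAllLe (c : Int) (m : List (List Int)) : Prop :=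
  ∀ i j v, pvGetCell m i j = some v → v ≤ c

-- m is obtained from m0 by a sequence of legal relaxation writes
inductive pvReach : List (List Int) → List (List Int) → Prop
  | refl (m : List (List Int)) : pvReach m m
  | step {m0 m : List (List Int)} (i j a b v w : Int) :
      pvReach m0 m → (a, b) ∈ pvOffsetsA →
      pvGetCell m i j = some v → pvGetCell m (i + a) (j + b) = some w →
      w < v - 1 → pvReach m0 (pvSetCell m (i + a) (j + b) (v - 1))

/- ---------- basic cell lemmas ---------- -/

theorem pv_get_nonneg {m : List (List Int)} {i j v : Int}
    (h : pvGetCell m i j = some v) : 0 ≤ i ∧ 0 ≤ j := by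
  by_contra hc
  unfold pvGetCell at h
  rw [if_neg hc] at h
  exact absurd h (by simp)

theorem pv_shape_set (m : List (List Int)) (i j z : Int) :
    pvShape (pvSetCell m i j z) = pvShape m := by
  unfold pvShape pvSetCell
  apply List.ext_getElem?
  intro n
  simp [List.getElem?_map, List.getElem?_modify]
  cases m[n]? with
  | none => rfl
  | some r => by_cases h : i.toNat = n <;> simp [h]

theorem pv_get_isSome_of_shape {m m' : List (List Int)}
    (hs : pvShape m = pvShape m') (i j : Int) :
    (pvGetCell m i j).isSome = (pvGetCell m' i j).isSome := by
  unfold pvGetCell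
  by_cases h : 0 ≤ i ∧ 0 ≤ j
  · rw [if_pos h, if_pos h]
    have hlen : m.length = m'.length := by
      have := congrArg List.length hs; simpa [pvShape] using this
    cases hm : m[i.toNat]? with
    | none =>
      have : m'[i.toNat]? = none := by
        rw [List.getElem?_eq_none_iff] at hm ⊢; omega
      simp [this]
    | some r =>
      have hi : i.toNat < m.length := (List.getElem?_eq_some_iff.mp hm).1
      have hi' : i.toNat < m'.length := by omega
      have hr : m[i.toNat]? = some m[i.toNat] := List.getElem?_eq_some_iff.mpr ⟨hi, rfl⟩
      have hr' : m'[i.toNat]? = some m'[i.toNat] := List.getElem?_eq_some_iff.mpr ⟨hi', rfl⟩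
      have hrl : m[i.toNat].length = m'[i.toNat].length := by
        have h1 : (pvShape m)[i.toNat]? = (pvShape m')[i.toNat]? := by rw [hs]
        simp [pvShape, List.getElem?_map, hr, hr'] at h1
        exact h1
      rw [hm] at hr
      rw [hr', Option.bind_some]
      cases hr
      simp only [Option.bind_some]
      by_cases hj : j.toNat < m[i.toNat].length
      · have : j.toNat < m'[i.toNat].length := by omega
        simp [List.getElem?_eq_some_iff, hj, this]
      · have h1 : m[i.toNat][j.toNat]? = none := by rw [List.getElem?_eq_none_iff]; omega
        have h2 : m'[i.toNat][j.toNat]? = none := by rw [List.getElem?_eq_none_iff]; omega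
        simp [h1, h2]
  · rw [if_neg h, if_neg h]

theorem pv_get_set_self {m : List (List Int)} {i j w : Int} (z : Int)
    (h : pvGetCell m i j = some w) :
    pvGetCell (pvSetCell m i j z) i j = some z := by
  obtain ⟨hi, hj⟩ := pv_get_nonneg h
  unfold pvGetCell pvSetCell at *
  rw [if_pos ⟨hi, hj⟩] at h ⊢
  cases hm : m[i.toNat]? with
  | none => simp [hm] at h
  | some r =>
    simp [hm] at h
    have hjr : j.toNat < r.length := (List.getElem?_eq_some_iff.mp h).1
    simp [List.getElem?_modify, hm, List.getElem?_set, hjr]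

theorem pv_get_set_ne {m : List (List Int)} {i j w : Int} (z : Int) {p q : Int}
    (h : pvGetCell m i j = some w) (hne : ¬(p = i ∧ q = j)) :
    pvGetCell (pvSetCell m i j z) p q = pvGetCell m p q := by
  obtain ⟨hi, hj⟩ := pv_get_nonneg h
  unfold pvGetCell pvSetCell at *
  by_cases hpq : 0 ≤ p ∧ 0 ≤ q
  · rw [if_pos hpq] at *
    rw [List.getElem?_modify]
    cases hm : m[p.toNat]? with
    | none => simp [hpq]
    | some r =>
      by_cases hip : i.toNat = p.toNat
      · have hpi : p = i := by omega
        have hqj : ¬ q = j := fun hq => hne ⟨hpi, hq⟩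
        have hjq' : j.toNat ≠ q.toNat := by omega
        simp [hpq, hip, List.getElem?_set, hjq']
      · simp [hpq, hip]
  · rw [if_neg hpq, if_neg hpq]

theorem pv_mem_flatten_of_get {m : List (List Int)} {i j v : Int}
    (h : pvGetCell m i j = some v) : v ∈ m.flatten := by
  obtain ⟨hi, hj⟩ := pv_get_nonneg h
  unfold pvGetCell at h
  rw [if_pos ⟨hi, hj⟩] at h
  cases hm : m[i.toNat]? with
  | none => simp [hm] at h
  | some r =>
    simp [hm] at h
    have hr : r ∈ m := by
      have := List.getElem?_eq_some_iff.mp hm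
      obtain ⟨hlt, heq⟩ := this
      exact heq ▸ List.getElem_mem hlt
    have hv : v ∈ r := by
      obtain ⟨hlt, heq⟩ := List.getElem?_eq_some_iff.mp h
      exact heq ▸ List.getElem_mem hlt
    exact List.mem_flatten.mpr ⟨r, hr, hv⟩

theorem pv_cap_bound {m : List (List Int)} {i j v : Int}
    (h : pvGetCell m i j = some v) : v ≤ pvCap m :=
  (PySem.List.le_foldl_max m.flatten (m.flatten.headD 0)).2 v (pv_mem_flatten_of_get h)

theorem pv_ext {m m' : List (List Int)}
    (hs : pvShape m = pvShape m')
    (h : ∀ i j : Int, pvGetCell m i j = pvGetCell m' i j) : m = m' := by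
  apply List.ext_getElem?
  intro n
  have hlen : m.length = m'.length := by
    have := congrArg List.length hs; simpa [pvShape] using this
  by_cases hn : n < m.length
  · have hn' : n < m'.length := by omega
    rw [List.getElem?_eq_some_iff.mpr ⟨hn, rfl⟩, List.getElem?_eq_some_iff.mpr ⟨hn', rfl⟩]
    congr 1
    apply List.ext_getElem?
    intro k
    have := h (n : Int) (k : Int)
    unfold pvGetCell at this
    rw [if_pos ⟨Int.natCast_nonneg n, Int.natCast_nonneg k⟩] at this
    simpa [List.getElem?_eq_some_iff, hn, hn'] using this
  · rw [List.getElem?_eq_none_iff.mpr (by omega), List.getElem?_eq_none_iff.mpr (by omega)]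

theorem pv_slack_row (c z : Int) : ∀ (r : List Int) (k : Nat) (w : Int), r[k]? = some w →
    ((r.set k z).map (fun v => (c - v).toNat)).sum + (c - w).toNat
      = (r.map (fun v => (c - v).toNat)).sum + (c - z).toNat := by
  intro r
  induction r with
  | nil => intro k w h; simp at h
  | cons x t ih =>
    intro k w h
    cases k with
    | zero => simp at h; subst h; simp; omega
    | succ k =>
      simp at h
      have := ih k w h
      rw [List.set_cons_succ]
      simp only [List.map_cons, List.sum_cons]
      omega

theorem pv_slack_set_aux (c z : Int) : ∀ (m : List (List Int)) (n k : Nat) (r : List Int) (w : Int),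
    m[n]? = some r → r[k]? = some w →
    pvSlack c (m.modify n (fun row => row.set k z)) + (c - w).toNat
      = pvSlack c m + (c - z).toNat := by
  intro m
  induction m with
  | nil => intro n k r w h _; simp at h
  | cons x t ih =>
    intro n k r w hm hw
    cases n with
    | zero =>
      simp at hm; subst hm
      have := pv_slack_row c z x k w hw
      have hmod : (x :: t).modify 0 (fun row => row.set k z) = x.set k z :: t := by
        simp [List.modify]
      rw [hmod]
      simp only [pvSlack, List.flatten_cons, List.map_append, List.sum_append]
      omega
    | succ n =>
      simp at hm
      have := ih n k r w hm hw
      have hmod : (x :: t).modify (n+1) (fun row => row.set k z) = x :: t.modify n (fun row => row.set k z) := by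
        simp [List.modify]
      rw [hmod]
      simp only [pvSlack, List.flatten_cons, List.map_append, List.sum_append] at this ⊢
      omega

theorem pv_slack_set {m : List (List Int)} {i j w : Int} (c z : Int)
    (h : pvGetCell m i j = some w) :
    pvSlack c (pvSetCell m i j z) + (c - w).toNat = pvSlack c m + (c - z).toNat := by
  obtain ⟨hi, hj⟩ := pv_get_nonneg h
  unfold pvGetCell at h
  rw [if_pos ⟨hi, hj⟩] at h
  cases hm : m[i.toNat]? with
  | none => simp [hm] at h
  | some r =>
    simp [hm] at h
    exact pv_slack_set_aux c z m i.toNat j.toNat r w hm h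

/- ---------- cell enumeration lemmas ---------- -/

theorem pv_get_parts {m : List (List Int)} {i j v : Int} (h : pvGetCell m i j = some v) :
    0 ≤ i ∧ 0 ≤ j ∧ ∃ (ha : i.toNat < m.length),
      ∃ (hb : j.toNat < (m[i.toNat]).length), m[i.toNat][j.toNat] = v := by
  obtain ⟨hi, hj⟩ := pv_get_nonneg h
  unfold pvGetCell at h
  rw [if_pos ⟨hi, hj⟩] at h
  cases hm : m[i.toNat]? with
  | none => simp [hm] at h
  | some r =>
    simp [hm] at h
    obtain ⟨ha, har⟩ := List.getElem?_eq_some_iff.mp hm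
    obtain ⟨hb, hbr⟩ := List.getElem?_eq_some_iff.mp h
    refine ⟨hi, hj, ha, ?_⟩
    subst har
    exact ⟨hb, hbr⟩

theorem pv_get_of_parts {m : List (List Int)} {a b : Nat}
    (ha : a < m.length) (hb : b < (m[a]).length) :
    pvGetCell m (a : Int) (b : Int) = some (m[a][b]) := by
  unfold pvGetCell
  rw [if_pos ⟨Int.natCast_nonneg a, Int.natCast_nonneg b⟩]
  simp [List.getElem?_eq_some_iff, ha, hb]

theorem pv_mem_cells {m : List (List Int)} {i j v : Int} (h : pvGetCell m i j = some v) :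
    (i, j) ∈ pvCells m := by
  obtain ⟨hi, hj, ha, hb, _⟩ := pv_get_parts h
  unfold pvCells
  rw [List.mem_flatMap]
  refine ⟨((i.toNat : Int), m[i.toNat]), ?_, ?_⟩
  · exact (PySem.List.mem_enumerate_iff _ _ _).mpr ⟨i.toNat, ha, by simp⟩
  · rw [List.mem_map]
    exact ⟨((j.toNat : Int), m[i.toNat][j.toNat]),
      (PySem.List.mem_enumerate_iff _ _ _).mpr ⟨j.toNat, hb, by simp⟩,
      by simp; constructor <;> omega⟩

theorem pv_cells_valid {m : List (List Int)} {ij : Int × Int} (h : ij ∈ pvCells m) :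
    (pvGetCell m ij.1 ij.2).isSome := by
  unfold pvCells at h
  rw [List.mem_flatMap] at h
  obtain ⟨ir, hir, hmem⟩ := h
  rw [List.mem_map] at hmem
  obtain ⟨jx, hjx, heq⟩ := hmem
  obtain ⟨k, hk, hirk⟩ := (PySem.List.mem_enumerate_iff _ _ _).mp hir
  subst hirk
  obtain ⟨l, hl, hjxl⟩ := (PySem.List.mem_enumerate_iff _ _ _).mp hjx
  subst hjxl
  simp at heq hl
  obtain rfl := heq
  rw [pv_get_of_parts hk hl]
  simp

theorem pv_mem_foldl_insertBy {α : Type} (before : α → α → Bool) :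
    ∀ (l acc : List α) (x : α),
      x ∈ l.foldl (fun acc t => PySem.List.insertBy before t acc) acc ↔ x ∈ acc ∨ x ∈ l := by
  intro l
  induction l with
  | nil => simp
  | cons y t ih =>
    intro acc x
    simp only [List.foldl_cons, ih, PySem.List.mem_insertBy, List.mem_cons]
    tauto

theorem pv_mem_initDeque_iff {m : List (List Int)} {t : Int × Int × Int} :
    t ∈ pvInitDeque m ↔ pvGetCell m t.2.1 t.2.2 = some t.1 := by
  unfold pvInitDeque
  rw [List.mem_reverse, pv_mem_foldl_insertBy]
  simp only [List.mem_nil_iff, false_or, List.mem_flatMap, List.mem_map]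
  constructor
  · rintro ⟨ir, hir, jx, hjx, heq⟩
    obtain ⟨k, hk, hirk⟩ := (PySem.List.mem_enumerate_iff _ _ _).mp hir
    subst hirk
    obtain ⟨l, hl, hjxl⟩ := (PySem.List.mem_enumerate_iff _ _ _).mp hjx
    subst hjxl
    simp at hl heq
    rw [← heq]
    simpa using pv_get_of_parts hk hl
  · intro h
    obtain ⟨a, b, c⟩ := t
    simp only at h ⊢
    obtain ⟨hi, hj, ha, hb, hv⟩ := pv_get_parts h
    refine ⟨((b.toNat : Int), m[b.toNat]), ?_, ((c.toNat : Int), m[b.toNat][c.toNat]), ?_, ?_⟩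
    · exact (PySem.List.mem_enumerate_iff _ _ _).mpr ⟨b.toNat, ha, by simp⟩
    · exact (PySem.List.mem_enumerate_iff _ _ _).mpr ⟨c.toNat, hb, by simp⟩
    · simp only [Prod.mk.injEq]
      exact ⟨hv, by omega, by omega⟩

/- ---------- offset facts ---------- -/

theorem pv_off_ne_zero {a b : Int} (h : (a, b) ∈ pvOffsetsA) : ¬(a = 0 ∧ b = 0) := by
  fin_cases h <;> simp

theorem pv_off_symm {a b : Int} (h : (a, b) ∈ pvOffsetsA) : (-a, -b) ∈ pvOffsetsA := by
  fin_cases h <;> simp [pvOffsetsA]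

theorem pv_off_cover {a b : Int} (h : (a, b) ∈ pvOffsetsA) :
    (-a, -b) ∈ pvOffsetsFwd ∨ (-a, -b) ∈ pvOffsetsBwd := by
  fin_cases h <;> simp [pvOffsetsFwd, pvOffsetsBwd]

theorem pv_fwd_sub {ab : Int × Int} (h : ab ∈ pvOffsetsFwd) : ab ∈ pvOffsetsA := by
  fin_cases h <;> simp [pvOffsetsA]

theorem pv_bwd_sub {ab : Int × Int} (h : ab ∈ pvOffsetsBwd) : ab ∈ pvOffsetsA := by
  fin_cases h <;> simp [pvOffsetsA]

/- ---------- pvReach lemmas ---------- -/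

theorem pvReach.shape {m0 m : List (List Int)} (h : pvReach m0 m) :
    pvShape m0 = pvShape m := by
  induction h with
  | refl => rfl
  | step i j a b v w _ _ _ _ _ ih => rw [ih, pv_shape_set]

theorem pvReach.trans {m0 m1 m2 : List (List Int)}
    (h1 : pvReach m0 m1) (h2 : pvReach m1 m2) : pvReach m0 m2 := by
  induction h2 with
  | refl => exact h1
  | step i j a b v w _ hab hg ht hlt ih => exact pvReach.step i j a b v w ih hab hg ht hlt

theorem pvReach.le {m0 m : List (List Int)} (h : pvReach m0 m) : pvLeM m0 m := by
  induction h with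
  | refl => intro i j v w h1 h2; rw [h1] at h2; cases h2; exact le_refl _
  | step i j a b v w hr hab hg ht hlt ih =>
    intro p q u u' h1 h2
    by_cases hpq : p = i + a ∧ q = j + b
    · obtain ⟨hp, hq⟩ := hpq
      subst hp; subst hq
      rw [pv_get_set_self (v - 1) ht] at h2
      cases h2
      have := ih _ _ _ _ h1 ht
      omega
    · rw [pv_get_set_ne (v - 1) ht hpq] at h2
      exact ih _ _ _ _ h1 h2

theorem pvReach.bound {m0 m mc : List (List Int)} (h : pvReach m0 m)
    (hs : pvShape m0 = pvShape mc) (hcl : pvClosed mc) (hle : pvLeM m0 mc) :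
    pvLeM m mc := by
  induction h with
  | refl => exact hle
  | step i j a b v w hr hab hg ht hlt ih =>
    intro p q u u' h1 h2
    by_cases hpq : p = i + a ∧ q = j + b
    · obtain ⟨hp, hq⟩ := hpq
      subst hp; subst hq
      rw [pv_get_set_self (v - 1) ht] at h1
      cases h1
      -- mc has a value at (i, j) and at (i+a, j+b)
      have hsm := (hr.shape).symm.trans hs
      have hvs : (pvGetCell mc i j).isSome := by
        rw [← pv_get_isSome_of_shape hsm]; simp [hg]
      obtain ⟨vc, hvc⟩ := Option.isSome_iff_exists.mp hvs
      have h1 := ih _ _ _ _ hg hvc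
      have h2' := hcl _ _ _ hvc (a, b) hab _ h2
      omega
    · rw [pv_get_set_ne (v - 1) ht hpq] at h1
      exact ih _ _ _ _ h1 h2

theorem pv_antisymm {m m' : List (List Int)} (hs : pvShape m = pvShape m')
    (h1 : pvLeM m m') (h2 : pvLeM m' m) : m = m' := by
  apply pv_ext hs
  intro i j
  cases hg : pvGetCell m i j with
  | none =>
    have : (pvGetCell m' i j).isSome = (pvGetCell m i j).isSome :=
      (pv_get_isSome_of_shape hs i j).symm
    rw [hg] at this
    simpa using (Option.not_isSome_iff_eq_none.mp (by simp [this])).symm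
  | some v =>
    have : (pvGetCell m' i j).isSome := by
      rw [← pv_get_isSome_of_shape hs]; simp [hg]
    obtain ⟨w, hw⟩ := Option.isSome_iff_exists.mp this
    have := h1 _ _ _ _ hg hw
    have := h2 _ _ _ _ hw hg
    rw [hw]
    congr 1
    omega

/- ---------- A-side: the relax fold ---------- -/

def pvStepA (i j v : Int) (s : List (List Int) × List (Int × Int × Int)) (ab : Int × Int) :
    List (List Int) × List (Int × Int × Int) :=
  let x := i + ab.1
  let y := j + ab.2
  if 0 ≤ x ∧ 0 ≤ y then
    match pvGetCell s.1 x y with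
    | some w => if w < v - 1 then (pvSetCell s.1 x y (v - 1), s.2 ++ [(0, x, y)]) else s
    | none => s
  else s

theorem pvRelaxA_eq (i j v : Int) (s : List (List Int) × List (Int × Int × Int)) :
    pvRelaxA i j v s = pvOffsetsA.foldl (pvStepA i j v) s := rfl

theorem pvStepA_cases (i j v : Int) (m : List (List Int)) (d : List (Int × Int × Int))
    (ab : Int × Int) :
    (pvStepA i j v (m, d) ab = (m, d) ∧
      (∀ w, pvGetCell m (i + ab.1) (j + ab.2) = some w → v - 1 ≤ w)) ∨
    (∃ w, pvGetCell m (i + ab.1) (j + ab.2) = some w ∧ w < v - 1 ∧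
      pvStepA i j v (m, d) ab =
        (pvSetCell m (i + ab.1) (j + ab.2) (v - 1), d ++ [(0, i + ab.1, j + ab.2)])) := by
  unfold pvStepA
  by_cases h1 : 0 ≤ i + ab.1 ∧ 0 ≤ j + ab.2
  · simp only [if_pos h1]
    cases hg : pvGetCell m (i + ab.1) (j + ab.2) with
    | none => exact Or.inl ⟨rfl, by simp⟩
    | some w =>
      by_cases h2 : w < v - 1
      · exact Or.inr ⟨w, rfl, h2, by simp [h2]⟩
      · refine Or.inl ⟨by simp [h2], ?_⟩
        intro w' hw'
        cases hw'; omega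
  · refine Or.inl ⟨by simp [h1], ?_⟩
    intro w hw
    have := pv_get_nonneg hw
    exact absurd this h1

theorem pv_relax_go (c : Int) :
    ∀ (offs : List (Int × Int)) (i j v : Int) (m : List (List Int)) (d : List (Int × Int × Int)),
    (∀ ab ∈ offs, ab ∈ pvOffsetsA) →
    pvGetCell m i j = some v →
    pvAllLe c m →
    (∀ t ∈ d, (pvGetCell m t.2.1 t.2.2).isSome) →
    pvReach m (offs.foldl (pvStepA i j v) (m, d)).1 ∧
    pvGetCell (offs.foldl (pvStepA i j v) (m, d)).1 i j = some v ∧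
    (∀ ab ∈ offs, ∀ w,
      pvGetCell (offs.foldl (pvStepA i j v) (m, d)).1 (i + ab.1) (j + ab.2) = some w → v - 1 ≤ w) ∧
    (∀ p q, pvGetCell (offs.foldl (pvStepA i j v) (m, d)).1 p q ≠ pvGetCell m p q →
      ∃ e, (e, p, q) ∈ (offs.foldl (pvStepA i j v) (m, d)).2) ∧
    (∀ t ∈ d, t ∈ (offs.foldl (pvStepA i j v) (m, d)).2) ∧
    9 * pvSlack c (offs.foldl (pvStepA i j v) (m, d)).1 + (offs.foldl (pvStepA i j v) (m, d)).2.length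
      ≤ 9 * pvSlack c m + d.length ∧
    pvAllLe c (offs.foldl (pvStepA i j v) (m, d)).1 ∧
    (∀ t ∈ (offs.foldl (pvStepA i j v) (m, d)).2,
      (pvGetCell (offs.foldl (pvStepA i j v) (m, d)).1 t.2.1 t.2.2).isSome) := by
  intro offs
  induction offs with
  | nil =>
    intro i j v m d hsub hv hcap hdok
    refine ⟨pvReach.refl m, hv, by simp, ?_, fun t ht => ht, le_refl _, hcap, hdok⟩
    intro p q hne
    exact absurd rfl hne
  | cons ab offs ih =>
    intro i j v m d hsub hv hcap hdok
    have hab : ab ∈ pvOffsetsA := hsub ab List.mem_cons_self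
    have hsub' : ∀ x ∈ offs, x ∈ pvOffsetsA := fun x hx => hsub x (List.mem_cons_of_mem _ hx)
    rw [List.foldl_cons]
    rcases pvStepA_cases i j v m d ab with ⟨heq, hcon⟩ | ⟨w, hw, hwlt, heq⟩
    · rw [heq]
      obtain ⟨a1, b1, c1, d1, e1, f1, g1, h1⟩ := ih i j v m d hsub' hv hcap hdok
      refine ⟨a1, b1, ?_, d1, e1, f1, g1, h1⟩
      intro ab' hab' w' hw'
      rcases List.mem_cons.mp hab' with rfl | hmem
      · -- target value only went up during the fold
        have hsm : pvShape m = pvShape (offs.foldl (pvStepA i j v) (m, d)).1 := a1.shape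
        have : (pvGetCell m (i + ab'.1) (j + ab'.2)).isSome := by
          rw [pv_get_isSome_of_shape hsm]; simp [hw']
        obtain ⟨w0, hw0⟩ := Option.isSome_iff_exists.mp this
        have := a1.le _ _ _ _ hw0 hw'
        have := hcon w0 hw0
        omega
      · exact c1 ab' hmem w' hw'
    · rw [heq]
      have hne : ¬(i = i + ab.1 ∧ j = j + ab.2) := by
        have := pv_off_ne_zero hab
        intro hc; exact this ⟨by omega, by omega⟩
      have hv1 : pvGetCell (pvSetCell m (i + ab.1) (j + ab.2) (v - 1)) i j = some v := by
        rw [pv_get_set_ne (v - 1) hw hne]; exact hv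
      have hvc : v ≤ c := hcap _ _ _ hv
      have hcap1 : pvAllLe c (pvSetCell m (i + ab.1) (j + ab.2) (v - 1)) := by
        intro p q u hu
        by_cases hpq : p = i + ab.1 ∧ q = j + ab.2
        · obtain ⟨rfl, rfl⟩ := hpq
          rw [pv_get_set_self (v - 1) hw] at hu
          cases hu; omega
        · rw [pv_get_set_ne (v - 1) hw hpq] at hu
          exact hcap _ _ _ hu
      have hshape1 : pvShape m = pvShape (pvSetCell m (i + ab.1) (j + ab.2) (v - 1)) :=
        (pv_shape_set m _ _ _).symm
      have hdok1 : ∀ t ∈ d ++ [((0 : Int), i + ab.1, j + ab.2)],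
          (pvGetCell (pvSetCell m (i + ab.1) (j + ab.2) (v - 1)) t.2.1 t.2.2).isSome := by
        intro t ht
        rcases List.mem_append.mp ht with ht | ht
        · rw [← pv_get_isSome_of_shape hshape1]; exact hdok t ht
        · simp at ht; subst ht
          simp [pv_get_set_self (v - 1) hw]
      obtain ⟨a1, b1, c1, d1, e1, f1, g1, h1⟩ :=
        ih i j v (pvSetCell m (i + ab.1) (j + ab.2) (v - 1)) (d ++ [(0, i + ab.1, j + ab.2)])
          hsub' hv1 hcap1 hdok1
      have hstep : pvReach m (pvSetCell m (i + ab.1) (j + ab.2) (v - 1)) :=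
        pvReach.step i j ab.1 ab.2 v w (pvReach.refl m) hab hv hw hwlt
      refine ⟨hstep.trans a1, b1, ?_, ?_, ?_, ?_, g1, h1⟩
      · intro ab' hab' w' hw'
        rcases List.mem_cons.mp hab' with rfl | hmem
        · have hset : pvGetCell (pvSetCell m (i + ab'.1) (j + ab'.2) (v - 1)) (i + ab'.1) (j + ab'.2)
              = some (v - 1) := pv_get_set_self (v - 1) hw
          have := a1.le _ _ _ _ hset hw'
          omega
        · exact c1 ab' hmem w' hw'
      · intro p q hne'
        by_cases hch : pvGetCell (offs.foldl (pvStepA i j v) (pvSetCell m (i + ab.1) (j + ab.2) (v - 1), d ++ [(0, i + ab.1, j + ab.2)])).1 p q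
            = pvGetCell (pvSetCell m (i + ab.1) (j + ab.2) (v - 1)) p q
        · -- the change happened at the head write: p q = target
          by_cases hpq : p = i + ab.1 ∧ q = j + ab.2
          · obtain ⟨rfl, rfl⟩ := hpq
            exact ⟨0, e1 _ (by simp)⟩
          · rw [hch, pv_get_set_ne (v - 1) hw hpq] at hne'
            exact absurd rfl hne'
        · exact d1 p q hch
      · intro t ht
        exact e1 t (List.mem_append.mpr (Or.inl ht))
      · have hwc : w ≤ c := hcap _ _ _ hw
        have hslack := pv_slack_set c (v - 1) hw
        have hlen : (d ++ [((0 : Int), i + ab.1, j + ab.2)]).length = d.length + 1 := by simp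
        rw [hlen] at f1
        omega

/- ---------- A-side: the while loop ---------- -/

def pvInvA (m : List (List Int)) (d : List (Int × Int × Int)) : Prop :=
  (∀ t ∈ d, (pvGetCell m t.2.1 t.2.2).isSome) ∧
  ∀ i j v, pvGetCell m i j = some v →
    (∃ e, (e, i, j) ∈ d) ∨
    (∀ ab ∈ pvOffsetsA, ∀ w, pvGetCell m (i + ab.1) (j + ab.2) = some w → v - 1 ≤ w)

theorem pv_loopA_spec (c : Int) :
    ∀ (fuel : Nat) (m : List (List Int)) (d : List (Int × Int × Int)),
    pvInvA m d → pvAllLe c m → 9 * pvSlack c m + d.length < fuel →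
    pvReach m (pvLoopA fuel m d) ∧ pvClosed (pvLoopA fuel m d) := by
  intro fuel
  induction fuel with
  | zero => intro m d _ _ h; omega
  | succ fuel ih =>
    intro m d hinv hcap hfuel
    cases d with
    | nil =>
      show pvReach m m ∧ pvClosed m
      refine ⟨pvReach.refl m, ?_⟩
      intro i j v hv ab hab w hw
      rcases hinv.2 i j v hv with ⟨e, he⟩ | hcon
      · simp at he
      · exact hcon ab hab w hw
    | cons t rest =>
      obtain ⟨e0, p0, q0⟩ := t
      have hts : (pvGetCell m (e0, p0, q0).2.1 (e0, p0, q0).2.2).isSome :=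
        hinv.1 _ List.mem_cons_self
      obtain ⟨v, hv⟩ := Option.isSome_iff_exists.mp hts
      simp only at hts hv
      have hunf : pvLoopA (fuel + 1) m ((e0, p0, q0) :: rest)
          = pvLoopA fuel (pvRelaxA p0 q0 v (m, rest)).1
              (pvRelaxA p0 q0 v (m, rest)).2 := by
        simp [pvLoopA, hv]
      rw [hunf, pvRelaxA_eq]
      have hdok : ∀ s ∈ rest, (pvGetCell m s.2.1 s.2.2).isSome :=
        fun s hs => hinv.1 s (List.mem_cons_of_mem _ hs)
      obtain ⟨a1, b1, c1, d1, e1, f1, g1, h1⟩ :=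
        pv_relax_go c pvOffsetsA p0 q0 v m rest (fun x hx => hx) hv hcap hdok
      set s' := pvOffsetsA.foldl (pvStepA p0 q0 v) (m, rest) with hs'
      have hinv' : pvInvA s'.1 s'.2 := by
        refine ⟨h1, ?_⟩
        intro p q u hu
        by_cases hch : pvGetCell s'.1 p q = pvGetCell m p q
        · rw [hch] at hu
          rcases hinv.2 p q u hu with ⟨e, he⟩ | hcon
          · rcases List.mem_cons.mp he with heq | hmem
            · -- (e, p, q) is the popped cell, fully relaxed by the fold
              have hp : p = p0 ∧ q = q0 := by
                have h1 := congrArg (fun z => z.2.1) heq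
                have h2 := congrArg (fun z => z.2.2) heq
                exact ⟨h1, h2⟩
              have huv : u = v := by
                rw [hp.1, hp.2] at hu
                rw [hu] at hv; cases hv; rfl
              refine Or.inr ?_
              intro ab hab w hw
              rw [hp.1, hp.2] at hw
              have := c1 ab hab w hw
              omega
            · exact Or.inl ⟨e, e1 _ hmem⟩
          · refine Or.inr ?_
            intro ab hab w' hw'
            have hsm : pvShape m = pvShape s'.1 := a1.shape
            have : (pvGetCell m (p + ab.1) (q + ab.2)).isSome := by
              rw [pv_get_isSome_of_shape hsm]; simp [hw']
            obtain ⟨w0, hw0⟩ := Option.isSome_iff_exists.mp this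
            have h2 := a1.le _ _ _ _ hw0 hw'
            have h3 := hcon ab hab w0 hw0
            omega
        · exact Or.inl (d1 p q hch)
      have hfuel' : 9 * pvSlack c s'.1 + s'.2.length < fuel := by
        have : ((e0, p0, q0) :: rest).length = rest.length + 1 := rfl
        omega
      obtain ⟨hr, hc⟩ := ih s'.1 s'.2 hinv' g1 hfuel'
      exact ⟨a1.trans hr, hc⟩

theorem pv_A_spec (mat : List (List Int)) :
    pvReach mat (to_mountain mat) ∧ pvClosed (to_mountain mat) := by
  unfold to_mountain
  apply pv_loopA_spec (pvCap mat)
  · constructor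
    · intro t ht
      rw [pv_mem_initDeque_iff.mp ht]
      simp
    · intro i j v hv
      exact Or.inl ⟨v, pv_mem_initDeque_iff.mpr hv⟩
  · intro i j v hv
    exact pv_cap_bound hv
  · unfold pvFuelA
    omega

/- ---------- B-side: best-of-neighbours ---------- -/

theorem pv_best_spec (m : List (List Int)) (i j : Int) :
    ∀ (offs : List (Int × Int)) (cur : Int),
    cur ≤ pvBest m i j offs cur ∧
    (pvBest m i j offs cur = cur ∨ ∃ ab ∈ offs, ∃ w,
      pvGetCell m (i + ab.1) (j + ab.2) = some w ∧ pvBest m i j offs cur = w - 1) ∧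
    (∀ ab ∈ offs, ∀ w, pvGetCell m (i + ab.1) (j + ab.2) = some w →
      w - 1 ≤ pvBest m i j offs cur) := by
  intro offs
  induction offs with
  | nil => intro cur; exact ⟨le_refl _, Or.inl rfl, by simp⟩
  | cons ab offs ih =>
    intro cur
    have hstep : pvBest m i j (ab :: offs) cur
        = pvBest m i j offs (match pvGetCell m (i + ab.1) (j + ab.2) with
            | some w => if w - 1 > cur then w - 1 else cur
            | none => cur) := rfl
    cases hg : pvGetCell m (i + ab.1) (j + ab.2) with
    | none =>
      have hstepN : pvBest m i j (ab :: offs) cur = pvBest m i j offs cur := by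
        rw [hstep, hg]
      rw [hstepN]
      obtain ⟨h1, h2, h3⟩ := ih cur
      refine ⟨h1, ?_, ?_⟩
      · rcases h2 with h2 | ⟨ab', hab', w, hw, he⟩
        · exact Or.inl h2
        · exact Or.inr ⟨ab', List.mem_cons_of_mem _ hab', w, hw, he⟩
      · intro ab' hab' w hw
        rcases List.mem_cons.mp hab' with rfl | hmem
        · rw [hg] at hw; cases hw
        · exact h3 ab' hmem w hw
    | some w0 =>
      have hstepS : pvBest m i j (ab :: offs) cur
          = pvBest m i j offs (if w0 - 1 > cur then w0 - 1 else cur) := by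
        rw [hstep, hg]
      rw [hstepS]
      by_cases hgt : w0 - 1 > cur
      · rw [if_pos hgt]
        obtain ⟨h1, h2, h3⟩ := ih (w0 - 1)
        refine ⟨by omega, ?_, ?_⟩
        · rcases h2 with h2 | ⟨ab', hab', w, hw, he⟩
          · exact Or.inr ⟨ab, List.mem_cons_self, w0, hg, h2⟩
          · exact Or.inr ⟨ab', List.mem_cons_of_mem _ hab', w, hw, he⟩
        · intro ab' hab' w hw
          rcases List.mem_cons.mp hab' with rfl | hmem
          · rw [hg] at hw; cases hw; omega
          · exact h3 ab' hmem w hw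
      · rw [if_neg hgt]
        obtain ⟨h1, h2, h3⟩ := ih cur
        refine ⟨h1, ?_, ?_⟩
        · rcases h2 with h2 | ⟨ab', hab', w, hw, he⟩
          · exact Or.inl h2
          · exact Or.inr ⟨ab', List.mem_cons_of_mem _ hab', w, hw, he⟩
        · intro ab' hab' w hw
          rcases List.mem_cons.mp hab' with rfl | hmem
          · rw [hg] at hw; cases hw; omega
          · exact h3 ab' hmem w hw

/- ---------- B-side: one sweep ---------- -/

def pvStepB (offs : List (Int × Int)) (s : List (List Int) × Bool) (ij : Int × Int) :
    List (List Int) × Bool :=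
  let cur := (pvGetCell s.1 ij.1 ij.2).getD 0
  let best := pvBest s.1 ij.1 ij.2 offs cur
  if best ≠ cur then (pvSetCell s.1 ij.1 ij.2 best, true) else s

theorem pvSweep_eq (offs cells : List (Int × Int)) (s : List (List Int) × Bool) :
    pvSweep offs cells s = cells.foldl (pvStepB offs) s := rfl

theorem pv_sweep_go (c : Int) (offs : List (Int × Int))
    (hoffs : ∀ ab ∈ offs, ab ∈ pvOffsetsA) :
    ∀ (cells : List (Int × Int)) (m : List (List Int)) (ch : Bool),
    (∀ ij ∈ cells, (pvGetCell m ij.1 ij.2).isSome) →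
    pvAllLe c m →
    pvReach m (cells.foldl (pvStepB offs) (m, ch)).1 ∧
    pvAllLe c (cells.foldl (pvStepB offs) (m, ch)).1 ∧
    (ch = false → (cells.foldl (pvStepB offs) (m, ch)).2 = false →
      (cells.foldl (pvStepB offs) (m, ch)).1 = m) ∧
    (ch = true → (cells.foldl (pvStepB offs) (m, ch)).2 = true) ∧
    pvSlack c (cells.foldl (pvStepB offs) (m, ch)).1 ≤ pvSlack c m ∧
    (ch = false → (cells.foldl (pvStepB offs) (m, ch)).2 = true →
      pvSlack c (cells.foldl (pvStepB offs) (m, ch)).1 < pvSlack c m) ∧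
    (ch = false → (cells.foldl (pvStepB offs) (m, ch)).2 = false →
      ∀ ij ∈ cells, ∀ cur, pvGetCell m ij.1 ij.2 = some cur →
        ∀ ab ∈ offs, ∀ w, pvGetCell m (ij.1 + ab.1) (ij.2 + ab.2) = some w → w - 1 ≤ cur) := by
  intro cells
  induction cells with
  | nil =>
    intro m ch _ hcap
    exact ⟨pvReach.refl m, hcap, fun _ _ => rfl, fun h => h, le_refl _,
      fun h1 h2 => by simp [h1] at h2, by simp⟩
  | cons ij cells ih =>
    intro m ch hcells hcap
    have hij : (pvGetCell m ij.1 ij.2).isSome := hcells ij List.mem_cons_self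
    obtain ⟨cur0, hcur0⟩ := Option.isSome_iff_exists.mp hij
    have hcells' : ∀ p ∈ cells, (pvGetCell m p.1 p.2).isSome :=
      fun p hp => hcells p (List.mem_cons_of_mem _ hp)
    obtain ⟨hb1, hb2, hb3⟩ := pv_best_spec m ij.1 ij.2 offs cur0
    rw [List.foldl_cons]
    by_cases hne : pvBest m ij.1 ij.2 offs cur0 ≠ cur0
    · -- a write happens at ij
      have hstep : pvStepB offs (m, ch) ij
          = (pvSetCell m ij.1 ij.2 (pvBest m ij.1 ij.2 offs cur0), true) := by
        unfold pvStepB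
        simp [hcur0, hne]
      rw [hstep]
      set best := pvBest m ij.1 ij.2 offs cur0 with hbest
      have hgt : cur0 < best := lt_of_le_of_ne hb1 (Ne.symm hne)
      obtain ⟨ab, hab, w, hw, hwe⟩ : ∃ ab ∈ offs, ∃ w,
          pvGetCell m (ij.1 + ab.1) (ij.2 + ab.2) = some w ∧ best = w - 1 := by
        rcases hb2 with h | h
        · exact absurd h hne
        · exact h
      set m1 := pvSetCell m ij.1 ij.2 best with hm1
      have hreach1 : pvReach m m1 := by
        have habA : (-ab.1, -ab.2) ∈ pvOffsetsA := pv_off_symm (hoffs ab hab)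
        have h1 : ij.1 + ab.1 + -ab.1 = ij.1 := by ring
        have h2 : ij.2 + ab.2 + -ab.2 = ij.2 := by ring
        have := pvReach.step (ij.1 + ab.1) (ij.2 + ab.2) (-ab.1) (-ab.2) w cur0
          (pvReach.refl m) habA hw (by rw [h1, h2]; exact hcur0) (by omega)
        rw [h1, h2] at this
        rw [hm1, hwe]
        exact this
      have hshape1 : pvShape m = pvShape m1 := (pv_shape_set m _ _ _).symm
      have hwc : w ≤ c := hcap _ _ _ hw
      have hbc : best ≤ c := by omega
      have hcap1 : pvAllLe c m1 := by
        intro p q u hu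
        by_cases hpq : p = ij.1 ∧ q = ij.2
        · obtain ⟨rfl, rfl⟩ := hpq
          rw [hm1, pv_get_set_self best hcur0] at hu
          cases hu; exact hbc
        · rw [hm1, pv_get_set_ne best hcur0 hpq] at hu
          exact hcap _ _ _ hu
      have hcells1 : ∀ p ∈ cells, (pvGetCell m1 p.1 p.2).isSome := by
        intro p hp
        rw [← pv_get_isSome_of_shape hshape1]
        exact hcells' p hp
      have hslack1 : pvSlack c m1 < pvSlack c m := by
        have := pv_slack_set c best hcur0
        rw [← hm1] at this
        omega
      obtain ⟨a1, b1, c1, d1, e1, f1, g1⟩ := ih m1 true hcells1 hcap1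
      refine ⟨hreach1.trans a1, b1, ?_, ?_, by omega, ?_, ?_⟩
      · intro _ hfl
        rw [d1 rfl] at hfl; cases hfl
      · intro _; exact d1 rfl
      · intro _ _; omega
      · intro _ hfl
        rw [d1 rfl] at hfl; cases hfl
    · -- no change at ij
      push_neg at hne
      have hstep : pvStepB offs (m, ch) ij = (m, ch) := by
        unfold pvStepB
        simp [hcur0, hne]
      rw [hstep]
      obtain ⟨a1, b1, c1, d1, e1, f1, g1⟩ := ih m ch hcells' hcap
      refine ⟨a1, b1, c1, d1, e1, f1, ?_⟩
      intro h1 h2 p hp cur hcur ab hab w hw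
      rcases List.mem_cons.mp hp with rfl | hmem
      · have : cur = cur0 := by rw [hcur] at hcur0; cases hcur0; rfl
        subst this
        have := hb3 ab hab w hw
        omega
      · exact g1 h1 h2 p hmem cur hcur ab hab w hw

/- ---------- B-side: the while loop ---------- -/

theorem pv_loopB_spec (c : Int) :
    ∀ (fuel : Nat) (m : List (List Int)),
    pvAllLe c m → pvSlack c m < fuel →
    pvReach m (pvLoopB fuel m) ∧ pvClosed (pvLoopB fuel m) := by
  intro fuel
  induction fuel with
  | zero => intro m _ h; omega
  | succ fuel ih =>
    intro m hcap hfuel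
    have hunf : pvLoopB (fuel + 1) m
        = (if (pvSweep pvOffsetsBwd (pvCells (pvSweep pvOffsetsFwd (pvCells m) (m, false)).1).reverse
              (pvSweep pvOffsetsFwd (pvCells m) (m, false))).2
           then pvLoopB fuel (pvSweep pvOffsetsBwd (pvCells (pvSweep pvOffsetsFwd (pvCells m) (m, false)).1).reverse
              (pvSweep pvOffsetsFwd (pvCells m) (m, false))).1
           else (pvSweep pvOffsetsBwd (pvCells (pvSweep pvOffsetsFwd (pvCells m) (m, false)).1).reverse
              (pvSweep pvOffsetsFwd (pvCells m) (m, false))).1) := rfl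
    set s1 := pvSweep pvOffsetsFwd (pvCells m) (m, false) with hs1
    set s2 := pvSweep pvOffsetsBwd (pvCells s1.1).reverse s1 with hs2
    have hcells1 : ∀ ij ∈ pvCells m, (pvGetCell m ij.1 ij.2).isSome :=
      fun ij hij => pv_cells_valid hij
    have hsw1 : s1 = (pvCells m).foldl (pvStepB pvOffsetsFwd) (m, false) := by
      rw [hs1, pvSweep_eq]
    obtain ⟨a1, b1, c1, d1, e1, f1, g1⟩ :=
      pv_sweep_go c pvOffsetsFwd (fun ab h => pv_fwd_sub h) (pvCells m) m false hcells1 hcap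
    rw [← hsw1] at a1 b1 c1 d1 e1 f1 g1
    have hcells2 : ∀ ij ∈ (pvCells s1.1).reverse, (pvGetCell s1.1 ij.1 ij.2).isSome :=
      fun ij hij => pv_cells_valid (List.mem_reverse.mp hij)
    have hsw2 : s2 = (pvCells s1.1).reverse.foldl (pvStepB pvOffsetsBwd) (s1.1, s1.2) := by
      rw [hs2, pvSweep_eq, Prod.mk.eta]
    obtain ⟨a2, b2, c2, d2, e2, f2, g2⟩ :=
      pv_sweep_go c pvOffsetsBwd (fun ab h => pv_bwd_sub h) (pvCells s1.1).reverse s1.1 s1.2 hcells2 b1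
    rw [← hsw2] at a2 b2 c2 d2 e2 f2 g2
    rw [hunf]
    by_cases hfl : s2.2 = true
    · rw [if_pos hfl]
      have hslack2 : pvSlack c s2.1 < pvSlack c m := by
        cases hq : s1.2 with
        | true =>
          have := f1 rfl hq
          omega
        | false =>
          have := f2 hq hfl
          have := e1
          omega
      obtain ⟨hr, hc⟩ := ih s2.1 b2 (by omega)
      exact ⟨(a1.trans a2).trans hr, hc⟩
    · rw [if_neg hfl]
      have hfl' : s2.2 = false := by simp at hfl; exact hfl
      have hq : s1.2 = false := by
        cases hq : s1.2 with
        | true => rw [d2 hq] at hfl'; cases hfl'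
        | false => rfl
      have hm1 : s1.1 = m := c1 rfl hq
      have hm2 : s2.1 = s1.1 := c2 hq hfl'
      rw [hm2, hm1]
      refine ⟨pvReach.refl m, ?_⟩
      intro i j v hv ab hab w hw
      -- the target cell (i+ab.1, j+ab.2) was stable under the offset pointing back at (i, j)
      have hcd := pv_off_cover hab
      have h1 : i + ab.1 + -ab.1 = i := by ring
      have h2 : j + ab.2 + -ab.2 = j := by ring
      rcases hcd with hcd | hcd
      · have := g1 rfl hq (i + ab.1, j + ab.2) (pv_mem_cells hw) w hw
          (-ab.1, -ab.2) hcd v (by simp only []; rw [h1, h2]; exact hv)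
        omega
      · have hmem : (i + ab.1, j + ab.2) ∈ (pvCells s1.1).reverse := by
          rw [List.mem_reverse, hm1]
          exact pv_mem_cells hw
        have := g2 hq hfl' (i + ab.1, j + ab.2) hmem w (by rw [hm1]; exact hw)
          (-ab.1, -ab.2) hcd v (by simp only []; rw [h1, h2, hm1]; exact hv)
        omega

theorem pv_B_spec (mat : List (List Int)) :
    pvReach mat (to_mountain_alt mat) ∧ pvClosed (to_mountain_alt mat) := by
  unfold to_mountain_alt
  apply pv_loopB_spec (pvCap mat)
  · intro i j v hv
    exact pv_cap_bound hv
  · unfold pvFuelB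
    omega

-- ===== VERDICT (by name: the statement is the Claim_ definition above) =====
theorem to_mountain_spec : Claim_equal_to_mountain := by
  intro mat _
  unfold Spec_to_mountain
  obtain ⟨ra, ca⟩ := pv_A_spec mat
  obtain ⟨rb, cb⟩ := pv_B_spec mat
  exact pv_antisymm (ra.shape.symm.trans rb.shape)
    (ra.bound rb.shape cb rb.le) (rb.bound ra.shape ca ra.le)
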